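-- pv_equiv track=rewrite | github.com/Garry-Tang-274/IBI1_2025-26 | Practical7/stop_codons.py | find_in_frame_stops
-- ===== SOURCE A (Python) =====
-- START_CODON = "ATG"
--
-- STOP_CODONS = {"TAA", "TAG", "TGA"}
--
-- def find_in_frame_stops(sequence):
--     """Find all in-frame stop codons in the sequence"""
--     found_stops = set()
--     seq_len = len(sequence)
--     # Find all ATG start positions
--     for i in range(seq_len - 2):
--         if sequence[i:i+3] == START_CODON:
--             # Read codons step 3 (in-frame)
--             for j in range(i, seq_len - 2, 3):
--                 codon = sequence[j:j+3]
--                 if codon in STOP_CODONS: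
--                     found_stops.add(codon)
--                     break  # Stop at first termination
--     return found_stops
-- ===== SOURCE B (Python) =====
-- START_CODON = "ATG"
--
-- STOP_CODONS = {"TAA", "TAG", "TGA"}
--
-- def find_in_frame_stops(sequence):
--     """Find all in-frame stop codons in the sequence.
--
--     Backward DP pass: next_stop[j] = the first in-frame stop codon at or
--     after position j; then one forward pass over ATG positions.
--     """
--     n = len(sequence)
--     next_stop = [None] * n
--     for j in range(n - 3, -1, -1):
--         codon = sequence[j:j+3]
--         if codon in STOP_CODONS:
--             next_stop[j] = codon
--         elif j + 3 < n:
--             next_stop[j] = next_stop[j + 3]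
--     found_stops = set()
--     for i in range(n - 2):
--         if sequence[i:i+3] == START_CODON and next_stop[i] is not None:
--             found_stops.add(next_stop[i])
--     return found_stops
-- ===== Notes on version B (the rewrite author's own statement) =====
-- stated objective: alternative
-- what changed: Replaced A's nested rescan (for every ATG position, scan forward in steps of 3 to its first stop codon) with a backward dynamic-programming pass that records the next in-frame stop for every position, followed by one forward pass over ATG positions.
import Mathlib
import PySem

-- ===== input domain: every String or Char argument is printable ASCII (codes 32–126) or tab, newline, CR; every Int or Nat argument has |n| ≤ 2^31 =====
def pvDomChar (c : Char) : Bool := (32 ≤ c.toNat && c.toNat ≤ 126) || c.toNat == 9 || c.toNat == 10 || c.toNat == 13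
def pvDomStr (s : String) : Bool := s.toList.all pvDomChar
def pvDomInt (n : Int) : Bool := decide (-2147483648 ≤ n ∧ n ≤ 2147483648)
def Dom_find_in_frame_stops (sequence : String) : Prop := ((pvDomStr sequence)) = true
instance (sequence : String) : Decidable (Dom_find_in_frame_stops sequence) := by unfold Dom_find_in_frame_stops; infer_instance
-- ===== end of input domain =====

-- B replaces A's nested rescan (for every ATG, scan forward to its first in-frame stop) by a
-- backward DP pass recording the next in-frame stop per position; objective: alternative algorithm.

-- module constants shared by both Pythons
def pvSTART_CODON : String := "ATG"
def pvSTOP_CODONS : List String := ["TAA", "TAG", "TGA"]   -- Python set literal; only membership-tested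

-- ===== PORT A =====
-- inner loop 'for j in range(i, seq_len-2, 3): … break' of A
def pvInnerA (s : List Char) (js : List Int) (acc : PySem.Set String) : PySem.Set String :=
  match js with
  | [] => acc
  | j :: rest =>
      let codon := String.ofList (PySem.List.slice s (some j) (some (j + 3)))
      if codon ∈ pvSTOP_CODONS then PySem.Set.add acc codon
      else pvInnerA s rest acc

def find_in_frame_stops (sequence : String) : List String :=
  let s := sequence.toList
  let seq_len : Int := (s.length : Int)
  (PySem.List.pyRange 0 (seq_len - 2) 1).foldl
    (fun acc i =>
      if String.ofList (PySem.List.slice s (some i) (some (i + 3))) = pvSTART_CODON then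
        pvInnerA s (PySem.List.pyRange i (seq_len - 2) 3) acc
      else acc)
    []

-- ===== PORT B =====
-- backward loop 'for j in range(n-3, -1, -1)' of B; m = j+1 (number of entries still to fill),
-- rest = already-filled entries for indices m..n-1 (plus the [None,None] tail initialisation)
def pvBuildNext (s : List Char) (n : Nat) : Nat → List (Option String) → List (Option String)
  | 0, rest => rest
  | m + 1, rest =>
      let j := m
      let codon := String.ofList (PySem.List.slice s (some (j : Int)) (some ((j : Int) + 3)))
      let e := if codon ∈ pvSTOP_CODONS then some codon
               else if j + 3 < n then rest.getD 2 none else none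
      pvBuildNext s n m (e :: rest)

def find_in_frame_stops_alt (sequence : String) : List String :=
  let s := sequence.toList
  let n := s.length
  let next_stop := pvBuildNext s n (n - 2) (List.replicate (min n 2) none)
  (List.range (n - 2)).foldl
    (fun acc (i : Nat) =>
      if String.ofList (PySem.List.slice s (some (i : Int)) (some ((i : Int) + 3))) = pvSTART_CODON then
        match next_stop.getD i none with
        | some c => PySem.Set.add acc c
        | none => acc
      else acc)
    []

-- ===== PRECONDITION & SPEC =====
def Spec_find_in_frame_stops (sequence : String) (out : List String) : Prop := out = find_in_frame_stops_alt sequence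
instance (sequence : String) (out : List String) : Decidable (Spec_find_in_frame_stops sequence out) := by unfold Spec_find_in_frame_stops; infer_instance

-- ===== CLAIM (what is proved, stated in full; the proofs are below) =====
def Claim_equal_find_in_frame_stops : Prop := ∀ (sequence : String), Dom_find_in_frame_stops sequence → Spec_find_in_frame_stops sequence (find_in_frame_stops sequence)

-- ===== LEMMAS AND PROOFS =====

-- the first in-frame stop codon at or after position j (specification of both loops)
def pvFirst (s : List Char) (n : Nat) (j : Nat) : Option String :=
  if h : j + 2 < n then
    if String.ofList (PySem.List.slice s (some (j : Int)) (some ((j : Int) + 3))) ∈ pvSTOP_CODONS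
    then some (String.ofList (PySem.List.slice s (some (j : Int)) (some ((j : Int) + 3))))
    else pvFirst s n (j + 3)
  else none
termination_by n - j
decreasing_by omega

-- structural unfolding of the step-3 range
lemma pvRange3_cons (a b : Int) (h : a < b) :
    PySem.List.pyRange a b 3 = a :: PySem.List.pyRange (a + 3) b 3 := by
  rw [PySem.List.pyRange_of_pos _ _ (by norm_num : (0:Int) < 3),
      PySem.List.pyRange_of_pos _ _ (by norm_num : (0:Int) < 3)]
  by_cases hb : a + 3 < b
  · have h1 : ((b - a + 3 - 1) / 3).toNat = ((b - (a + 3) + 3 - 1) / 3).toNat + 1 := by omega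
    simp only [if_pos h, if_pos hb, h1, List.range_succ_eq_map, List.map_cons, List.map_map]
    congr 1
    · norm_num
    · apply List.map_congr_left
      intro k _
      simp only [Function.comp]
      push_cast
      ring
  · have h1 : ((b - a + 3 - 1) / 3).toNat = 1 := by omega
    simp [if_pos h, if_neg hb, h1]

lemma pvRange3_nil (a b : Int) (h : b ≤ a) : PySem.List.pyRange a b 3 = [] := by
  rw [PySem.List.pyRange_of_pos _ _ (by norm_num : (0:Int) < 3)]
  simp [show ¬ a < b by omega]

-- A's inner loop computes pvFirst
lemma pvInnerA_eq (s : List Char) (j : Nat) (acc : PySem.Set String) :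
    pvInnerA s (PySem.List.pyRange (j : Int) ((s.length : Int) - 2) 3) acc =
      match pvFirst s s.length j with
      | some c => PySem.Set.add acc c
      | none => acc := by
  suffices H : ∀ m (j : Nat) (acc : PySem.Set String), s.length - j ≤ m →
      pvInnerA s (PySem.List.pyRange (j : Int) ((s.length : Int) - 2) 3) acc =
        match pvFirst s s.length j with
        | some c => PySem.Set.add acc c
        | none => acc from H (s.length - j) j acc le_rfl
  intro m
  induction m with
  | zero =>
      intro j acc hm
      rw [pvRange3_nil _ _ (by omega), pvFirst]
      simp only [dif_neg (by omega : ¬ j + 2 < s.length)]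
      rfl
  | succ m ih =>
      intro j acc hm
      by_cases h : j + 2 < s.length
      · rw [pvRange3_cons _ _ (by omega), pvFirst]
        simp only [dif_pos h, pvInnerA]
        by_cases hc : String.ofList (PySem.List.slice s (some (j : Int)) (some ((j : Int) + 3))) ∈ pvSTOP_CODONS
        · simp [hc]
        · simp only [if_neg hc]
          have : ((j : Int) + 3) = ((j + 3 : Nat) : Int) := by push_cast; ring
          rw [this]
          exact ih (j + 3) acc (by omega)
      · rw [pvRange3_nil _ _ (by omega), pvFirst]
        simp only [dif_neg h]
        rfl

-- B's backward pass computes pvFirst at every index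
lemma pvBuildNext_getD (s : List Char) (n : Nat) :
    ∀ (m : Nat) (rest : List (Option String)), (m + 2 ≤ n ∨ m = 0) →
      (∀ k, rest.getD k none = pvFirst s n (m + k)) →
      ∀ k, (pvBuildNext s n m rest).getD k none = pvFirst s n k := by
  intro m
  induction m with
  | zero =>
      intro rest _ hinv k
      simpa using hinv k
  | succ m ih =>
      intro rest hm hinv k
      have hm' : m + 3 ≤ n := by omega
      rw [pvBuildNext]
      apply ih _ (Or.inl (by omega))
      intro k'
      cases k' with
      | zero =>
          rw [List.getD_cons_zero]
          simp only [Nat.add_zero]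
          rw [pvFirst, dif_pos (by omega : m + 2 < n)]
          by_cases hc : String.ofList (PySem.List.slice s (some (m : Int)) (some ((m : Int) + 3))) ∈ pvSTOP_CODONS
          · rw [if_pos hc, if_pos hc]
          · rw [if_neg hc, if_neg hc]
            by_cases h3 : m + 3 < n
            · rw [if_pos h3]
              simpa using hinv 2
            · rw [if_neg h3, pvFirst, dif_neg (by omega : ¬ m + 3 + 2 < n)]
      | succ k' =>
          rw [List.getD_cons_succ]
          rw [hinv k']
          congr 1
          omega

-- the initial [None, None] tail satisfies the invariant
lemma pvInit_inv (s : List Char) (n : Nat) (k : Nat) :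
    (List.replicate (min n 2) (none : Option String)).getD k none = pvFirst s n (n - 2 + k) := by
  rw [pvFirst]
  rw [dif_neg (by omega : ¬ n - 2 + k + 2 < n)]
  by_cases hk : k < min n 2
  · rw [List.getD_replicate _ hk]
  · rw [List.getD_eq_default _ _ (by simpa using (by omega : min n 2 ≤ k))]

-- ===== VERDICT (by name: the statement is the Claim_ definition above) =====
theorem find_in_frame_stops_spec : Claim_equal_find_in_frame_stops := by
  intro sequence _
  unfold Spec_find_in_frame_stops
  simp only [find_in_frame_stops, find_in_frame_stops_alt]
  rw [PySem.List.pyRange_one]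
  have hlen : (((sequence.toList.length : Int) - 2) - 0).toNat = sequence.toList.length - 2 := by omega
  rw [hlen, List.foldl_map]
  apply PySem.List.foldl_congr_mem
  intro acc k _
  have hz : ((0 : Int) + (k : Int)) = (k : Int) := by ring
  rw [hz]
  by_cases hc : String.ofList (PySem.List.slice sequence.toList (some (k : Int)) (some ((k : Int) + 3))) = pvSTART_CODON
  · simp only [if_pos hc]
    rw [pvInnerA_eq]
    rw [pvBuildNext_getD sequence.toList sequence.toList.length (sequence.toList.length - 2)
          (List.replicate (min sequence.toList.length 2) none)
          (by omega)
          (fun k' => pvInit_inv sequence.toList sequence.toList.length k') k]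
  · simp only [if_neg hc]
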